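-- pv_equiv track=rewrite | github.com/svend4/meta | projects/hexuniqgrp/hexuniqgrp.py | is_unique_order
-- ===== SOURCE A (Python) =====
-- def _prime_factors(n: int) -> list[int]:
--     """Разложить n на простые множители (с повторениями)."""
--     factors = []
--     d = 2
--     while d * d <= n:
--         while n % d == 0:
--             factors.append(d)
--             n //= d
--         d += 1
--     if n > 1:
--         factors.append(n)
--     return factors
--
-- def _is_squarefree(n: int) -> bool:
--     """Проверить отсутствие квадратных множителей."""
--     factors = _prime_factors(n)
--     return len(factors) == len(set(factors))
--
-- def _is_prime(n: int) -> bool: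
--     if n < 2:
--         return False
--     if n == 2:
--         return True
--     if n % 2 == 0:
--         return False
--     for i in range(3, int(n ** 0.5) + 1, 2):
--         if n % i == 0:
--             return False
--     return True
--
-- def is_unique_order(n: int) -> bool:
--     """Проверить: существует ли ровно одна группа порядка n?
--
--     Условие (Hall, 1928): n уникален ⟺
--       1. n нечётное
--       2. n — свободное от квадратов (squarefree)
--       3. Для каждой пары простых p | n и q | n: q ≢ 1 (mod p)
--     """
--     if n <= 1:
--         return False
--     if _is_prime(n):
--         return False   # простые тривиальны (только одна группа, но не "интересная")
--     if n % 2 == 0: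
--         return False
--     if not _is_squarefree(n):
--         return False
--
--     primes = list(set(_prime_factors(n)))
--     for p in primes:
--         for q in primes:
--             if p != q and (q - 1) % p == 0:
--                 return False
--     return True
-- ===== SOURCE B (Python) =====
-- def is_unique_order(n: int) -> bool:
--     if n <= 1 or n % 2 == 0:
--         return False
--     # single factorization pass computing Euler's totient phi(n)
--     phi = 1
--     m = n
--     d = 2
--     while d * d <= m:
--         if m % d == 0:
--             m //= d
--             phi *= d - 1
--             while m % d == 0:
--                 m //= d
--                 phi *= d
--         d += 1
--     if m > 1:
--         phi *= m - 1
--     if phi == n - 1:          # n is prime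
--         return False
--     # Hall/Szele criterion: exactly one group of order n  <=>  gcd(n, phi(n)) == 1
--     a, b = n, phi
--     while b:
--         a, b = b, a % b
--     return a == 1
-- ===== Notes on version B (the rewrite author's own statement) =====
-- stated objective: alternative
-- what changed: B computes Euler's totient phi(n) in one factorization pass and decides everything by the Hall/Szele criterion gcd(n, phi(n)) == 1 (reading primality off as phi(n) == n-1), replacing A's separate trial-division primality test, squarefree check and pairwise (q-1) % p loop over the set of prime factors.
import Mathlib
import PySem

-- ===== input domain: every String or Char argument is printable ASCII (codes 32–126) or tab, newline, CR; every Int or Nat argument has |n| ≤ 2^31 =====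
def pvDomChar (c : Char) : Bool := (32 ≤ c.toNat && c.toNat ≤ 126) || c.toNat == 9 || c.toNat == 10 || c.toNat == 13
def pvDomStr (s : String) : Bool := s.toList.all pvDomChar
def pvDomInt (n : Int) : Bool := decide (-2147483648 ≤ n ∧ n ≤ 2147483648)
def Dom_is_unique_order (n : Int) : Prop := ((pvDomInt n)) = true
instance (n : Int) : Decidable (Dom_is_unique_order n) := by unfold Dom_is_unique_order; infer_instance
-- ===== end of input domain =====

-- B computes Euler's totient in one factorization pass and decides by the
-- Hall/Szele criterion gcd(n, phi(n)) = 1 (primality read off as phi(n) = n-1);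
-- objective: alternative algorithm, same asymptotic cost.

-- ===== PORT A =====
-- small named termination facts (cited from decreasing_by; keeping the proof terms
-- inside the definitions small)
theorem pvDecDiv {m d : Int} (h2 : 2 ≤ d) (h3 : 1 ≤ m)
    (hm : (PySem.Int.mod m d == 0) = true) :
    (PySem.Int.floordiv m d).toNat < m.toNat := by
  simp only [beq_iff_eq] at hm
  have heq : PySem.Int.floordiv m d * d + PySem.Int.mod m d = m :=
    PySem.Int.floordiv_mul_add_mod m d
  have hq0 : 0 < PySem.Int.floordiv m d := by nlinarith
  have : PySem.Int.floordiv m d < m := by nlinarith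
  omega

theorem pvDecStep {m d : Int} (h1 : d * d ≤ m) (h2 : 2 ≤ d) :
    (m - (d + 1)).toNat < (m - d).toNat := by
  have : d < m := by nlinarith
  omega

-- _prime_factors: the nested while loops as well-founded recursion on (n, n - d);
-- the '2 ≤ d' conjunct is only the termination guard (d starts at 2 and only grows).
def pvPfA (n d : Int) : List Int :=
  if h : d * d ≤ n ∧ 2 ≤ d then
    if PySem.Int.mod n d == 0 then d :: pvPfA (PySem.Int.floordiv n d) d
    else pvPfA n (d + 1)
  else if n > 1 then [n] else []
termination_by (n.toNat, (n - d).toNat)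
decreasing_by
  · exact Prod.Lex.left _ _ (pvDecDiv h.2 (by nlinarith [h.1, h.2]) (by assumption))
  · exact Prod.Lex.right _ (pvDecStep h.1 h.2)

def pvPrimeFactorsA (n : Int) : List Int := pvPfA n 2

def pvIsSquarefreeA (n : Int) : Bool :=
  let factors := pvPrimeFactorsA n
  factors.length == (PySem.Set.ofList factors).length

-- int(n ** 0.5) ported as Nat.sqrt: exact for 0 ≤ n ≤ 2^31 (the stated domain), where the
-- float square root rounds to the integer square root.
def pvIsPrimeA (n : Int) : Bool :=
  if n < 2 then false
  else if n == 2 then true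
  else if PySem.Int.mod n 2 == 0 then false
  else (PySem.List.pyRange 3 ((n.toNat.sqrt : Int) + 1) 2).all
        (fun i => !(PySem.Int.mod n i == 0))

def is_unique_order (n : Int) : Bool :=
  if n ≤ 1 then false
  else if pvIsPrimeA n then false
  else if PySem.Int.mod n 2 == 0 then false
  else if !pvIsSquarefreeA n then false
  else
    let primes : PySem.Set Int := PySem.Set.ofList (pvPrimeFactorsA n)
    !(primes.any fun p => primes.any fun q => p != q && PySem.Int.mod (q - 1) p == 0)

-- ===== PORT B =====
-- B's own termination facts (cited from the decreasing_by of B's loops)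
theorem pvDecDivB {m d : Int} (h2 : 2 ≤ d) (h3 : 1 ≤ m)
    (hm : (PySem.Int.mod m d == 0) = true) :
    (PySem.Int.floordiv m d).toNat < m.toNat := by
  simp only [beq_iff_eq] at hm
  have heq : PySem.Int.floordiv m d * d + PySem.Int.mod m d = m :=
    PySem.Int.floordiv_mul_add_mod m d
  have hq0 : 0 < PySem.Int.floordiv m d := by nlinarith
  have : PySem.Int.floordiv m d < m := by nlinarith
  omega

theorem pvDecStepB {m d : Int} (h1 : d * d ≤ m) (h2 : 2 ≤ d) :
    (m - (d + 1)).toNat < (m - d).toNat := by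
  have : d < m := by nlinarith
  omega

-- Source B's inner 'while m % d == 0: m //= d; phi *= d' (the '2 ≤ d ∧ 1 ≤ m'
-- conjuncts are only the termination guard: they hold whenever the loop is reached).
def pvInnerB (m phi d : Int) : Int × Int :=
  if h : PySem.Int.mod m d == 0 ∧ 2 ≤ d ∧ 1 ≤ m then
    pvInnerB (PySem.Int.floordiv m d) (phi * d) d
  else (m, phi)
termination_by m.toNat
decreasing_by
  exact pvDecDivB h.2.1 h.2.2 h.1

-- needed only for the termination of pvOuterB
theorem pvInnerB_fst_le (m phi d : Int) : (pvInnerB m phi d).1 ≤ m := by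
  induction m, phi using pvInnerB.induct (d := d) with
  | case1 m phi h ih =>
    rw [pvInnerB, dif_pos h]
    obtain ⟨h1, h2, h3⟩ := h
    simp only [beq_iff_eq] at h1
    have heq : PySem.Int.floordiv m d * d + PySem.Int.mod m d = m :=
      PySem.Int.floordiv_mul_add_mod m d
    have : PySem.Int.floordiv m d ≤ m := by nlinarith [PySem.Int.floordiv_mul_add_mod m d]
    exact le_trans ih this
  | case2 m phi h => rw [pvInnerB, dif_neg h]

-- termination fact for the outer loop, citing pvInnerB_fst_le
theorem pvDecOuter {m phi d : Int} (h1 : d * d ≤ m) (h2 : 2 ≤ d)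
    (hm : (PySem.Int.mod m d == 0) = true) :
    (pvInnerB (PySem.Int.floordiv m d) phi d).1.toNat < m.toNat := by
  have hle := pvInnerB_fst_le (PySem.Int.floordiv m d) phi d
  have hlt := pvDecDivB h2 (by nlinarith) hm
  omega

-- Source B's outer 'while d * d <= m' loop carrying (m, phi)
def pvOuterB (m phi d : Int) : Int :=
  if h : d * d ≤ m ∧ 2 ≤ d then
    if PySem.Int.mod m d == 0 then
      pvOuterB (pvInnerB (PySem.Int.floordiv m d) (phi * (d - 1)) d).1
               (pvInnerB (PySem.Int.floordiv m d) (phi * (d - 1)) d).2 (d + 1)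
    else pvOuterB m phi (d + 1)
  else if m > 1 then phi * (m - 1) else phi
termination_by (m.toNat, (m - d).toNat)
decreasing_by
  · exact Prod.Lex.left _ _ (pvDecOuter h.1 h.2 (by assumption))
  · exact Prod.Lex.right _ (pvDecStepB h.1 h.2)

-- termination fact for the gcd loop
theorem pvDecMod {a b : Int} (h : b ≠ 0) : (PySem.Int.mod a b).natAbs < b.natAbs := by
  rcases lt_or_gt_of_ne h with hb | hb
  · have := PySem.Int.mod_neg_bounds a hb
    omega
  · have h1 := PySem.Int.mod_nonneg a hb
    have h2 := PySem.Int.mod_lt a hb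
    omega

-- Source B's gcd loop 'while b: a, b = b, a % b'
def pvGcdB (a b : Int) : Int :=
  if h : b ≠ 0 then pvGcdB b (PySem.Int.mod a b) else a
termination_by b.natAbs
decreasing_by
  exact pvDecMod h

def is_unique_order_alt (n : Int) : Bool :=
  if n ≤ 1 || PySem.Int.mod n 2 == 0 then false
  else
    let phi := pvOuterB n 1 2
    if phi == n - 1 then false
    else pvGcdB n phi == 1

-- ===== PRECONDITION & SPEC =====
def Spec_is_unique_order (n : Int) (out : Bool) : Prop := out = is_unique_order_alt n
instance (n : Int) (out : Bool) : Decidable (Spec_is_unique_order n out) := by unfold Spec_is_unique_order; infer_instance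

-- ===== CLAIM (what is proved, stated in full; the proofs are below) =====
def Claim_equal_is_unique_order : Prop := ∀ (n : Int), Dom_is_unique_order n → Spec_is_unique_order n (is_unique_order n)

-- ===== LEMMAS AND PROOFS =====

-- ---- Nat-level mirror of A's factor list ----
theorem pvDecDivN {n d : Nat} (h1 : d * d ≤ n) (h2 : 2 ≤ d) : n / d < n :=
  Nat.div_lt_self (by nlinarith) (by omega)

theorem pvDecStepN {n d : Nat} (h1 : d * d ≤ n) (h2 : 2 ≤ d) : n - (d + 1) < n - d := by
  have : 2 * d ≤ d * d := by nlinarith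
  omega

def pvPfN (n d : Nat) : List Nat :=
  if h : d * d ≤ n ∧ 2 ≤ d then
    if n % d = 0 then d :: pvPfN (n / d) d
    else pvPfN n (d + 1)
  else if 1 < n then [n] else []
termination_by (n, n - d)
decreasing_by
  · exact Prod.Lex.left _ _ (pvDecDivN h.1 h.2)
  · exact Prod.Lex.right _ (pvDecStepN h.1 h.2)

theorem pvPfN_prod (n d : Nat) : 2 ≤ d → 1 ≤ n → (pvPfN n d).prod = n := by
  induction n, d using pvPfN.induct with
  | case1 n d h hmod ih =>
    intro hd hn
    have hdvd : d ∣ n := Nat.dvd_of_mod_eq_zero hmod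
    rw [pvPfN]; simp only [dif_pos h, if_pos hmod, List.prod_cons]
    rw [ih hd (by have := h.1; have := h.2; exact Nat.one_le_div_iff (by omega) |>.mpr (by nlinarith))]
    exact Nat.mul_div_cancel' hdvd
  | case2 n d h hmod ih =>
    intro hd hn
    rw [pvPfN]; simp only [dif_pos h, if_neg hmod]
    exact ih (by omega) hn
  | case3 n d h h1 =>
    intro hd hn
    rw [pvPfN]; simp [h, h1]
  | case4 n d h h1 =>
    intro hd hn
    rw [pvPfN]; simp [h, h1]; omega

theorem pvPfN_prime (n d : Nat) : 2 ≤ d → (∀ k, 2 ≤ k → k < d → ¬ k ∣ n) →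
    ∀ p ∈ pvPfN n d, p.Prime := by
  induction n, d using pvPfN.induct with
  | case1 n d h hmod ih =>
    intro hd H p hp
    have hdvd : d ∣ n := Nat.dvd_of_mod_eq_zero hmod
    rw [pvPfN] at hp; simp only [dif_pos h, if_pos hmod, List.mem_cons] at hp
    rcases hp with rfl | hp
    · rw [Nat.prime_def_lt]
      refine ⟨hd, fun m hm hmd => ?_⟩
      by_contra hm1
      have hm0 : m ≠ 0 := by rintro rfl; simp at hmd; omega
      exact H m (by omega) hm (hmd.trans hdvd)
    · refine ih hd (fun k hk hkd hkdvd => H k hk hkd (hkdvd.trans (Nat.div_dvd_of_dvd hdvd))) p hp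
  | case2 n d h hmod ih =>
    intro hd H p hp
    rw [pvPfN] at hp; simp only [dif_pos h, if_neg hmod] at hp
    refine ih (by omega) (fun k hk hkd hkdvd => ?_) p hp
    rcases Nat.lt_succ_iff_lt_or_eq.mp hkd with hkd | rfl
    · exact H k hk hkd hkdvd
    · exact hmod (Nat.mod_eq_zero_of_dvd hkdvd)
  | case3 n d h h1 =>
    intro hd H p hp
    rw [pvPfN] at hp; simp [h, h1] at hp
    subst hp
    rw [Nat.prime_def_le_sqrt]
    refine ⟨by omega, fun m hm hms => ?_⟩
    have hmm : m * m ≤ p := Nat.le_sqrt.mp hms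
    have hnd : ¬ d * d ≤ p := fun hc => h ⟨hc, hd⟩
    exact H m hm (by nlinarith)
  | case4 n d h h1 =>
    intro hd H p hp
    rw [pvPfN] at hp; simp [h, h1] at hp

-- the Int-level loop is the Nat-level loop, cast
theorem pvPfA_eq_pvPfN (n d : Nat) :
    pvPfA (n : Int) (d : Int) = (pvPfN n d).map (fun k : Nat => (k : Int)) := by
  induction n, d using pvPfN.induct with
  | case1 n d h hmod ih =>
    have h' : (d : Int) * d ≤ n ∧ 2 ≤ (d : Int) := by exact_mod_cast h
    rw [pvPfA, pvPfN]
    simp only [dif_pos h, dif_pos h', PySem.Int.mod_natCast, PySem.Int.floordiv_natCast,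
      hmod]
    simpa using ih
  | case2 n d h hmod ih =>
    have h' : (d : Int) * d ≤ n ∧ 2 ≤ (d : Int) := by exact_mod_cast h
    rw [pvPfA, pvPfN]
    simp only [dif_pos h, dif_pos h', PySem.Int.mod_natCast, if_neg hmod]
    have hne : ¬ ((((n % d : Nat)) : Int) == 0) = true := by
      simp [Int.natCast_dvd_natCast, Nat.dvd_iff_mod_eq_zero, hmod]
    rw [if_neg hne]
    have hcast : (d : Int) + 1 = ((d + 1 : Nat) : Int) := by push_cast; ring
    rw [hcast, ih]
  | case3 n d h h1 =>
    have h' : ¬ ((d : Int) * d ≤ n ∧ 2 ≤ (d : Int)) := by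
      intro hc; exact h (by exact_mod_cast hc)
    rw [pvPfA, pvPfN]
    simp only [dif_neg h, dif_neg h', if_pos h1]
    have : (n : Int) > 1 := by exact_mod_cast h1
    simp [this]
  | case4 n d h h1 =>
    have h' : ¬ ((d : Int) * d ≤ n ∧ 2 ≤ (d : Int)) := by
      intro hc; exact h (by exact_mod_cast hc)
    rw [pvPfA, pvPfN]
    simp only [dif_neg h, dif_neg h', if_neg h1]
    have : ¬ (n : Int) > 1 := by exact_mod_cast h1
    simp [this]

theorem pvPfN_perm (n : Nat) (h : 2 ≤ n) : (pvPfN n 2).Perm n.primeFactorsList :=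
  Nat.primeFactorsList_unique (pvPfN_prod n 2 le_rfl (by omega))
    (pvPfN_prime n 2 le_rfl (fun k hk hk2 => by omega))

-- A's primality test equals Nat.Prime on the casts (int(n**0.5) = Nat.sqrt on the domain)
theorem pvIsPrimeA_eq (m : Nat) (hm : 2 ≤ m) : pvIsPrimeA (m : Int) = decide m.Prime := by
  rcases eq_or_lt_of_le hm with rfl | hm3
  · norm_num [pvIsPrimeA]
  have h1 : ¬ ((m : Int) < 2) := by omega
  have hne2 : ¬ (((m : Int)) == 2) = true := by simp; omega
  by_cases he : m % 2 = 0
  · have hmod : (PySem.Int.mod (m : Int) 2 == 0) = true := by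
      have : PySem.Int.mod (m : Int) 2 = ((m % 2 : Nat) : Int) := by
        exact_mod_cast PySem.Int.mod_natCast m 2
      rw [this]; simp; omega
    rw [pvIsPrimeA, if_neg h1, if_neg hne2, if_pos hmod]
    symm
    simp only [decide_eq_false_iff_not]
    intro hp
    rcases (Nat.Prime.eq_one_or_self_of_dvd hp 2 (Nat.dvd_of_mod_eq_zero he)) with h | h <;> omega
  · have hmod : ¬ (PySem.Int.mod (m : Int) 2 == 0) = true := by
      have : PySem.Int.mod (m : Int) 2 = ((m % 2 : Nat) : Int) := by
        exact_mod_cast PySem.Int.mod_natCast m 2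
      rw [this]; simp; omega
    rw [pvIsPrimeA, if_neg h1, if_neg hne2, if_neg hmod]
    have htn : ((m : Int)).toNat = m := by omega
    rw [htn, Bool.eq_iff_iff]
    simp only [List.all_eq_true, decide_eq_true_iff, Bool.not_eq_eq_eq_not, Bool.not_true,
      beq_eq_false_iff_ne, ne_eq]
    constructor
    · intro H
      rw [Nat.prime_def_le_sqrt]
      refine ⟨hm, fun k hk hks hkd => ?_⟩
      have hko : k % 2 = 1 := by
        rcases Nat.mod_two_eq_zero_or_one k with h0 | h1'
        · exact absurd (Nat.dvd_of_mod_eq_zero h0 |>.trans hkd)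
            (fun h2m => he (Nat.mod_eq_zero_of_dvd h2m))
        · exact h1'
      have hk3 : 3 ≤ k := by omega
      have hmem : ((k : Int)) ∈ PySem.List.pyRange 3 ((m.sqrt : Int) + 1) 2 := by
        rw [PySem.List.mem_pyRange_iff_of_pos (by norm_num)]
        refine ⟨by omega, by omega, by omega⟩
      have := H _ hmem
      apply this
      have : PySem.Int.mod (m : Int) (k : Int) = ((m % k : Nat) : Int) :=
        PySem.Int.mod_natCast m k
      rw [this]
      simp [Nat.mod_eq_zero_of_dvd hkd]
    · intro hp i hi
      rw [PySem.List.mem_pyRange_iff_of_pos (by norm_num)] at hi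
      obtain ⟨hi3, hilt, _⟩ := hi
      intro hmod0
      rw [PySem.Int.mod_eq_zero_iff_dvd] at hmod0
      have hi' : i = ((i.toNat : Nat) : Int) := by omega
      rw [hi'] at hmod0
      have hdvd : i.toNat ∣ m := Int.natCast_dvd_natCast.mp hmod0
      have := (Nat.prime_def_le_sqrt.mp hp).2 i.toNat (by omega) (by omega)
      exact this hdvd

-- ---- Nat-level mirrors of B's loops ----
theorem pvDecDivModN {m d : Nat} (h : m % d = 0 ∧ 2 ≤ d ∧ 1 ≤ m) : m / d < m :=
  Nat.div_lt_self (by omega) (by omega)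

def pvInnerN (m phi d : Nat) : Nat × Nat :=
  if h : m % d = 0 ∧ 2 ≤ d ∧ 1 ≤ m then pvInnerN (m / d) (phi * d) d
  else (m, phi)
termination_by m
decreasing_by exact pvDecDivModN h

theorem pvInnerN_fst_le (m phi d : Nat) : (pvInnerN m phi d).1 ≤ m := by
  induction m, phi using pvInnerN.induct (d := d) with
  | case1 a b h ih =>
    rw [pvInnerN, dif_pos h]
    exact le_trans ih (Nat.div_le_self a d)
  | case2 a b h => rw [pvInnerN, dif_neg h]

theorem pvDecOuterN {m phi d : Nat} (h1 : d * d ≤ m) (h2 : 2 ≤ d) :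
    (pvInnerN (m / d) phi d).1 < m := by
  have := pvInnerN_fst_le (m / d) phi d
  have := pvDecDivN h1 h2
  omega

def pvOuterN (m phi d : Nat) : Nat :=
  if h : d * d ≤ m ∧ 2 ≤ d then
    if m % d = 0 then
      pvOuterN (pvInnerN (m / d) (phi * (d - 1)) d).1
               (pvInnerN (m / d) (phi * (d - 1)) d).2 (d + 1)
    else pvOuterN m phi (d + 1)
  else if 1 < m then phi * (m - 1) else phi
termination_by (m, m - d)
decreasing_by
  · exact Prod.Lex.left _ _ (pvDecOuterN h.1 h.2)
  · exact Prod.Lex.right _ (pvDecStepN h.1 h.2)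

theorem pvDecModN {a b : Nat} (h : b ≠ 0) : a % b < b := Nat.mod_lt _ (by omega)

def pvGcdN (a b : Nat) : Nat :=
  if b ≠ 0 then pvGcdN b (a % b) else a
termination_by b
decreasing_by exact pvDecModN (by assumption)

-- ---- cast lemmas: the Int loops are the Nat loops ----
theorem pvInnerB_eq (m phi d : Nat) :
    pvInnerB (m : Int) (phi : Int) (d : Int) = (((pvInnerN m phi d).1 : Int), ((pvInnerN m phi d).2 : Int)) := by
  induction m, phi using pvInnerN.induct (d := d) with
  | case1 m phi h ih =>
    have h' : PySem.Int.mod (m : Int) (d : Int) == 0 ∧ 2 ≤ (d : Int) ∧ 1 ≤ (m : Int) := by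
      refine ⟨?_, by exact_mod_cast h.2.1, by exact_mod_cast h.2.2⟩
      have : PySem.Int.mod (m : Int) (d : Int) = ((m % d : Nat) : Int) := PySem.Int.mod_natCast m d
      simp [this, h.1]
    rw [pvInnerB, dif_pos h', pvInnerN, dif_pos h]
    rw [PySem.Int.floordiv_natCast]
    have : (phi : Int) * (d : Int) = ((phi * d : Nat) : Int) := by push_cast; ring
    rw [this, ih]
  | case2 m phi h =>
    have h' : ¬ (PySem.Int.mod (m : Int) (d : Int) == 0 ∧ 2 ≤ (d : Int) ∧ 1 ≤ (m : Int)) := by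
      intro hc
      apply h
      refine ⟨?_, by exact_mod_cast hc.2.1, by exact_mod_cast hc.2.2⟩
      have hmc : PySem.Int.mod (m : Int) (d : Int) = ((m % d : Nat) : Int) := PySem.Int.mod_natCast m d
      have := hc.1
      rw [hmc] at this
      simp only [beq_iff_eq, Nat.cast_eq_zero] at this
      exact this
    rw [pvInnerB, dif_neg h', pvInnerN, dif_neg h]

theorem pvOuterB_eq (m phi d : Nat) :
    pvOuterB (m : Int) (phi : Int) (d : Int) = ((pvOuterN m phi d : Nat) : Int) := by
  induction m, phi, d using pvOuterN.induct with
  | case1 m phi d h hmod ih =>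
    have h' : (d : Int) * d ≤ m ∧ 2 ≤ (d : Int) := by exact_mod_cast h
    have hmc : PySem.Int.mod (m : Int) (d : Int) = ((m % d : Nat) : Int) := PySem.Int.mod_natCast m d
    have hmod' : (PySem.Int.mod (m : Int) (d : Int) == 0) = true := by simp [hmc, hmod]
    rw [pvOuterB, dif_pos h', if_pos hmod', pvOuterN, dif_pos h, if_pos hmod]
    rw [PySem.Int.floordiv_natCast]
    have hsub : (phi : Int) * ((d : Int) - 1) = ((phi * (d - 1) : Nat) : Int) := by
      have : 2 ≤ d := h.2
      push_cast [Nat.cast_sub (by omega : 1 ≤ d)]; ring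
    rw [hsub, pvInnerB_eq]
    simpa using ih
  | case2 m phi d h hmod ih =>
    have h' : (d : Int) * d ≤ m ∧ 2 ≤ (d : Int) := by exact_mod_cast h
    have hmc : PySem.Int.mod (m : Int) (d : Int) = ((m % d : Nat) : Int) := PySem.Int.mod_natCast m d
    have hmod' : ¬ (PySem.Int.mod (m : Int) (d : Int) == 0) = true := by
      rw [hmc]
      simp only [beq_iff_eq, Nat.cast_eq_zero]
      exact hmod
    rw [pvOuterB, dif_pos h', if_neg hmod', pvOuterN, dif_pos h, if_neg hmod]
    have : (d : Int) + 1 = ((d + 1 : Nat) : Int) := by push_cast; ring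
    rw [this, ih]
  | case3 m phi d h h1 =>
    have h' : ¬ ((d : Int) * d ≤ m ∧ 2 ≤ (d : Int)) := by
      intro hc; exact h (by exact_mod_cast hc)
    rw [pvOuterB, dif_neg h', pvOuterN, dif_neg h, if_pos h1]
    have h1' : (m : Int) > 1 := by exact_mod_cast h1
    rw [if_pos h1']
    push_cast [Nat.cast_sub (by omega : 1 ≤ m)]; ring
  | case4 m phi d h h1 =>
    have h' : ¬ ((d : Int) * d ≤ m ∧ 2 ≤ (d : Int)) := by
      intro hc; exact h (by exact_mod_cast hc)
    rw [pvOuterB, dif_neg h', pvOuterN, dif_neg h, if_neg h1]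
    have h1' : ¬ (m : Int) > 1 := by exact_mod_cast h1
    rw [if_neg h1']

theorem pvGcdB_eq (a b : Nat) : pvGcdB (a : Int) (b : Int) = ((pvGcdN a b : Nat) : Int) := by
  induction a, b using pvGcdN.induct with
  | case1 a b h ih =>
    have h' : (b : Int) ≠ 0 := by exact_mod_cast h
    have hmc : PySem.Int.mod (a : Int) (b : Int) = ((a % b : Nat) : Int) := PySem.Int.mod_natCast a b
    rw [pvGcdB, dif_pos h', pvGcdN, if_pos h, hmc, ih]
  | case2 a b h =>
    have hb : b = 0 := by omega
    subst hb
    rw [pvGcdB, dif_neg (by simp), pvGcdN, if_neg (by simp)]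

theorem pvGcdN_eq_gcd (a b : Nat) : pvGcdN a b = Nat.gcd a b := by
  induction a, b using pvGcdN.induct with
  | case1 a b h ih =>
    rw [pvGcdN, if_pos h, ih, Nat.gcd_comm b, ← Nat.gcd_rec]
    exact Nat.gcd_comm b a
  | case2 a b h =>
    have hb : b = 0 := by omega
    subst hb
    rw [pvGcdN, if_neg (by simp), Nat.gcd_zero_right]

-- ---- the inner loop strips out all factors d ----
theorem pvInnerN_spec (m phi d : Nat) : 2 ≤ d → 1 ≤ m →
    ∃ e m', pvInnerN m phi d = (m', phi * d ^ e) ∧ m = d ^ e * m' ∧ ¬ d ∣ m' ∧ 1 ≤ m' := by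
  induction m, phi using pvInnerN.induct (d := d) with
  | case1 m phi h ih =>
    intro hd hm
    have hdvd : d ∣ m := Nat.dvd_of_mod_eq_zero h.1
    have hmd : 1 ≤ m / d := (Nat.one_le_div_iff (by omega)).mpr (Nat.le_of_dvd hm hdvd)
    obtain ⟨e, m', he, hfac, hnd, hm'⟩ := ih hd hmd
    refine ⟨e + 1, m', ?_, ?_, hnd, hm'⟩
    · rw [pvInnerN, dif_pos h, he]
      congr 1
      rw [pow_succ]; ring
    · calc m = d * (m / d) := (Nat.mul_div_cancel' hdvd).symm
        _ = d * (d ^ e * m') := by rw [hfac]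
        _ = d ^ (e + 1) * m' := by ring
  | case2 m phi h =>
    intro hd hm
    have hnd : ¬ d ∣ m := by
      intro hdvd
      exact h ⟨Nat.mod_eq_zero_of_dvd hdvd, hd, hm⟩
    exact ⟨0, m, by rw [pvInnerN, dif_neg h]; simp, by simp, hnd, hm⟩

-- ---- the outer loop computes phi * totient m ----
theorem pvOuterN_totient (m phi d : Nat) : 2 ≤ d → 1 ≤ m →
    (∀ k, 2 ≤ k → k < d → ¬ k ∣ m) → pvOuterN m phi d = phi * m.totient := by
  induction m, phi, d using pvOuterN.induct with
  | case1 m phi d h hmod ih =>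
    intro hd hm H
    have hdvd : d ∣ m := Nat.dvd_of_mod_eq_zero hmod
    have hdp : d.Prime := by
      rw [Nat.prime_def_lt]
      refine ⟨h.2, fun k hk hkd => ?_⟩
      by_contra hk1
      have hk0 : k ≠ 0 := by rintro rfl; simp at hkd; omega
      exact H k (by omega) hk (hkd.trans hdvd)
    have hmd : 1 ≤ m / d := (Nat.one_le_div_iff (by omega)).mpr (Nat.le_of_dvd hm hdvd)
    obtain ⟨e, m', he, hfac, hnd, hm'⟩ := pvInnerN_spec (m / d) (phi * (d - 1)) d h.2 hmd
    have hmfac : m = d ^ (e + 1) * m' := by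
      rw [pow_succ]
      have h2 : m = d * (m / d) := by rw [Nat.mul_div_cancel' hdvd]
      rw [h2, hfac]; ring
    have hcop : Nat.Coprime (d ^ (e + 1)) m' :=
      Nat.Coprime.pow_left _ ((Nat.Prime.coprime_iff_not_dvd hdp).mpr hnd)
    have htot : m.totient = d ^ e * (d - 1) * m'.totient := by
      rw [hmfac, Nat.totient_mul hcop, Nat.totient_prime_pow hdp (by omega)]
      simp
    have hH' : ∀ k, 2 ≤ k → k < d + 1 → ¬ k ∣ m' := by
      intro k hk hkd hkdvd
      rcases Nat.lt_succ_iff_lt_or_eq.mp hkd with hkd | rfl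
      · exact H k hk hkd (hkdvd.trans ⟨d ^ (e + 1), by rw [hmfac]; ring⟩)
      · exact hnd hkdvd
    rw [he] at ih
    dsimp only at ih
    rw [pvOuterN, dif_pos h, if_pos hmod, he]
    dsimp only
    rw [ih (by omega) hm' hH', htot]
    ring
  | case2 m phi d h hmod ih =>
    intro hd hm H
    rw [pvOuterN, dif_pos h, if_neg hmod]
    refine ih (by omega) hm (fun k hk hkd hkdvd => ?_)
    rcases Nat.lt_succ_iff_lt_or_eq.mp hkd with hkd | rfl
    · exact H k hk hkd hkdvd
    · exact hmod (Nat.mod_eq_zero_of_dvd hkdvd)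
  | case3 m phi d h h1 =>
    intro hd hm H
    have hp : m.Prime := by
      rw [Nat.prime_def_le_sqrt]
      refine ⟨by omega, fun k hk hks => ?_⟩
      have hmm : k * k ≤ m := Nat.le_sqrt.mp hks
      have hnd : ¬ d * d ≤ m := fun hc => h ⟨hc, hd⟩
      exact H k hk (by nlinarith)
    rw [pvOuterN, dif_neg h, if_pos h1, Nat.totient_prime hp]
  | case4 m phi d h h1 =>
    intro hd hm H
    have hm1 : m = 1 := by omega
    subst hm1
    rw [pvOuterN, dif_neg h, if_neg h1, Nat.totient_one, mul_one]

-- ---- Hall/Szele: coprimality of n and totient n in elementary terms ----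
theorem coprime_totient_iff (m : Nat) (hm : 2 ≤ m) :
    Nat.Coprime m m.totient ↔
      Squarefree m ∧ ∀ p ∈ m.primeFactors, ∀ q ∈ m.primeFactors, p ≠ q → ¬ p ∣ (q - 1) := by
  have hm0 : m ≠ 0 := by omega
  have hφ : m.totient = ∏ p ∈ m.primeFactors, p ^ (m.factorization p - 1) * (p - 1) := by
    rw [Nat.totient_eq_prod_factorization hm0, Finsupp.prod, Nat.support_factorization]
  constructor
  · intro hco
    constructor
    · rw [Nat.squarefree_iff_prime_squarefree]
      intro p hp hsq
      have hpm : p ∣ m := (dvd_mul_right p p).trans hsq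
      have hpPF : p ∈ m.primeFactors := Nat.mem_primeFactors.mpr ⟨hp, hpm, hm0⟩
      have hk : 2 ≤ m.factorization p := by
        have := (Nat.Prime.pow_dvd_iff_le_factorization hp hm0).mp (by
          rw [pow_two]; exact hsq)
        exact this
      have hpφ : p ∣ m.totient := by
        rw [hφ]
        refine dvd_trans (dvd_mul_of_dvd_left ?_ _) (Finset.dvd_prod_of_mem _ hpPF)
        exact dvd_pow_self p (by omega)
      exact absurd hco (Nat.Prime.not_coprime_iff_dvd.mpr ⟨p, hp, hpm, hpφ⟩)
    · intro p hpPF q hqPF hne hdvd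
      obtain ⟨hp, hpm, -⟩ := Nat.mem_primeFactors.mp hpPF
      have hpφ : p ∣ m.totient := by
        rw [hφ]
        exact dvd_trans (hdvd.trans (dvd_mul_left _ _)) (Finset.dvd_prod_of_mem _ hqPF)
      exact absurd hco (Nat.Prime.not_coprime_iff_dvd.mpr ⟨p, hp, hpm, hpφ⟩)
  · rintro ⟨hsq, hpair⟩
    by_contra hnc
    rw [Nat.Prime.not_coprime_iff_dvd] at hnc
    obtain ⟨p, hp, hpm, hpφ⟩ := hnc
    have hpPF : p ∈ m.primeFactors := Nat.mem_primeFactors.mpr ⟨hp, hpm, hm0⟩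
    rw [hφ, Prime.dvd_finset_prod_iff hp.prime] at hpφ
    obtain ⟨q, hqPF, hdvd⟩ := hpφ
    have hkq : m.factorization q ≤ 1 := (Nat.squarefree_iff_factorization_le_one hm0).mp hsq q
    rcases (Nat.Prime.dvd_mul hp).mp hdvd with hpow | hq1
    · have : m.factorization q - 1 = 0 := by omega
      rw [this, pow_zero] at hpow
      exact absurd (Nat.eq_one_of_dvd_one hpow) hp.ne_one
    · by_cases hpq : p = q
      · subst hpq
        have h1 : 1 ≤ p - 1 := by have := hp.two_le; omega
        have := Nat.le_of_dvd (by omega) hq1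
        have := hp.two_le
        omega
      · exact hpair p hpPF q hqPF hpq hq1

-- ---- Python's len(set(l)) == len(l) is Nodup ----
theorem pvLenOfList_eq_iff (G : List Int) : (PySem.Set.ofList G).length = G.length ↔ G.Nodup := by
  constructor
  · intro h
    have hnd : (PySem.Set.ofList G).Nodup := PySem.Set.nodup_ofList G
    have hts : (PySem.Set.ofList G).toFinset = G.toFinset := by
      ext z
      simp only [List.mem_toFinset, PySem.Set.mem_ofList]
    have h1 : G.toFinset.card = G.length := by
      rw [← hts, List.toFinset_card_of_nodup hnd, h]
    rw [List.card_toFinset] at h1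
    have hsub : G.dedup.Sublist G := List.dedup_sublist G
    have : G.dedup = G := hsub.eq_of_length h1
    rw [← List.dedup_eq_self]
    exact this
  · intro h
    rw [PySem.Set.ofList_eq_self_of_nodup G h]

-- ===== VERDICT (by name: the statement is the Claim_ definition above) =====
theorem is_unique_order_spec : Claim_equal_is_unique_order := by
  intro n _
  unfold Spec_is_unique_order
  by_cases hn : n ≤ 1
  · rw [is_unique_order, if_pos hn, is_unique_order_alt, if_pos (by simp [hn])]
  · obtain ⟨m, rfl⟩ : ∃ m : Nat, n = (m : Int) := ⟨n.toNat, by omega⟩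
    have hm : 2 ≤ m := by omega
    have hm0 : m ≠ 0 := by omega
    have hn' : ¬ ((m : Int) ≤ 1) := hn
    have hmod2 : PySem.Int.mod (m : Int) 2 = ((m % 2 : Nat) : Int) := by
      exact_mod_cast PySem.Int.mod_natCast m 2
    have hprimeA : pvIsPrimeA (m : Int) = decide m.Prime := pvIsPrimeA_eq m hm
    have hphi : pvOuterB (m : Int) 1 2 = ((m.totient : Nat) : Int) := by
      rw [show (1 : Int) = ((1 : Nat) : Int) by norm_num,
          show (2 : Int) = ((2 : Nat) : Int) by norm_num, pvOuterB_eq,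
          pvOuterN_totient m 1 2 le_rfl (by omega) (fun k hk hk2 => by omega), one_mul]
    by_cases hev : m % 2 = 0
    · -- even: both sides are false
      rw [is_unique_order_alt, if_pos (by simp [hmod2]; omega), is_unique_order, if_neg hn',
        hprimeA]
      by_cases hp : m.Prime
      · simp [hp]
      · have hmt : (PySem.Int.mod (m : Int) 2 == 0) = true := by rw [hmod2, hev]; simp
        rw [if_neg (by simp [hp]), if_pos hmt]
    · -- odd
      rw [is_unique_order_alt, if_neg (by simp [hmod2]; omega)]
      simp only [hphi]
      have hBprime : ((((m.totient : Nat)) : Int) == (m : Int) - 1) = decide m.Prime := by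
        rw [Bool.eq_iff_iff]
        simp only [beq_iff_eq, decide_eq_true_iff]
        rw [show ((m : Int) - 1) = ((m - 1 : Nat) : Int) by omega, Nat.cast_inj]
        exact Nat.totient_eq_iff_prime (by omega)
      have hBgcd : (pvGcdB (m : Int) ((m.totient : Nat) : Int) == 1)
          = decide (Nat.Coprime m m.totient) := by
        rw [pvGcdB_eq, pvGcdN_eq_gcd, Bool.eq_iff_iff]
        simp [Nat.Coprime]
      rw [is_unique_order, if_neg hn', hprimeA]
      by_cases hp : m.Prime
      · rw [hBprime]
        simp [hp]
      · rw [hBprime, hBgcd]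
        have hmf : (PySem.Int.mod (m : Int) 2 == 0) = false := by simp [hmod2]; omega
        simp only [hp, decide_false, Bool.false_eq_true, if_false, hmf]
        -- A facts
        have hFA : pvPrimeFactorsA (m : Int) = (pvPfN m 2).map (fun k : Nat => (k : Int)) := by
          rw [pvPrimeFactorsA, show (2 : Int) = ((2 : Nat) : Int) by norm_num, pvPfA_eq_pvPfN]
        have hFmem : ∀ p, p ∈ pvPfN m 2 ↔ p ∈ m.primeFactors := by
          intro p
          rw [(pvPfN_perm m hm).mem_iff, Nat.mem_primeFactorsList hm0, Nat.mem_primeFactors]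
          constructor
          · exact fun ⟨a, b⟩ => ⟨a, b, hm0⟩
          · exact fun ⟨a, b, _⟩ => ⟨a, b⟩
        have hmemS : ∀ z : Int, z ∈ PySem.Set.ofList ((pvPfN m 2).map (fun k : Nat => (k : Int)))
            ↔ ∃ p ∈ m.primeFactors, (p : Int) = z := by
          intro z
          rw [PySem.Set.mem_ofList, List.mem_map]
          constructor
          · rintro ⟨p, hp, rfl⟩; exact ⟨p, (hFmem p).mp hp, rfl⟩
          · rintro ⟨p, hp, rfl⟩; exact ⟨p, (hFmem p).mpr hp, rfl⟩
        have hsqA : pvIsSquarefreeA (m : Int) = decide (Squarefree m) := by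
          rw [pvIsSquarefreeA]
          simp only [hFA]
          rw [Bool.eq_iff_iff, beq_iff_eq, decide_eq_true_iff, eq_comm, pvLenOfList_eq_iff,
            List.nodup_map_iff (fun a b hab => by exact_mod_cast hab),
            (pvPfN_perm m hm).nodup_iff, ← Nat.squarefree_iff_nodup_primeFactorsList hm0]
        have hany : ((PySem.Set.ofList ((pvPfN m 2).map (fun k : Nat => (k : Int)))).any
              fun p => (PySem.Set.ofList ((pvPfN m 2).map (fun k : Nat => (k : Int)))).any
                fun q => p != q && PySem.Int.mod (q - 1) p == 0)
            = decide (∃ p ∈ m.primeFactors, ∃ q ∈ m.primeFactors, p ≠ q ∧ p ∣ (q - 1)) := by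
          rw [Bool.eq_iff_iff]
          simp only [List.any_eq_true, decide_eq_true_iff]
          constructor
          · rintro ⟨zp, hzp, zq, hzq, hb⟩
            obtain ⟨p, hpPF, rfl⟩ := (hmemS zp).mp hzp
            obtain ⟨q, hqPF, rfl⟩ := (hmemS zq).mp hzq
            simp only [Bool.and_eq_true, bne_iff_ne, ne_eq, beq_iff_eq] at hb
            obtain ⟨hne, hmodz⟩ := hb
            have hq1 : 1 ≤ q := (Nat.prime_of_mem_primeFactors hqPF).one_lt.le
            rw [show ((q : Int) - 1) = ((q - 1 : Nat) : Int) by omega,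
              PySem.Int.mod_natCast] at hmodz
            refine ⟨p, hpPF, q, hqPF, fun he => hne (by rw [he]), Nat.dvd_of_mod_eq_zero ?_⟩
            exact_mod_cast hmodz
          · rintro ⟨p, hpPF, q, hqPF, hne, hdvd⟩
            refine ⟨(p : Int), (hmemS _).mpr ⟨p, hpPF, rfl⟩,
                    (q : Int), (hmemS _).mpr ⟨q, hqPF, rfl⟩, ?_⟩
            have hq1 : 1 ≤ q := (Nat.prime_of_mem_primeFactors hqPF).one_lt.le
            simp only [Bool.and_eq_true, bne_iff_ne, ne_eq, beq_iff_eq]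
            refine ⟨fun he => hne (by exact_mod_cast he), ?_⟩
            rw [show ((q : Int) - 1) = ((q - 1 : Nat) : Int) by omega, PySem.Int.mod_natCast]
            simp [Nat.mod_eq_zero_of_dvd hdvd]
        by_cases hsf : Squarefree m
        · have hsb : (!pvIsSquarefreeA (m : Int)) = false := by simp [hsqA, hsf]
          rw [if_neg (by rw [hsb]; simp)]
          simp only [hFA]
          simp only [hany, ← decide_not]
          rw [decide_eq_decide, coprime_totient_iff m hm]
          push_neg
          constructor
          · exact fun H => ⟨hsf, fun p hp q hq hne => H p hp q hq hne⟩
          · exact fun H p hp q hq hne => H.2 p hp q hq hne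
        · have hsb : (!pvIsSquarefreeA (m : Int)) = true := by simp [hsqA, hsf]
          rw [if_pos hsb]
          have hnc : ¬ Nat.Coprime m m.totient :=
            fun hc => hsf ((coprime_totient_iff m hm).mp hc).1
          simp [hnc]
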